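-- pv_equiv track=rewrite | github.com/AnnisaSZ/Gender-Classification | Main.py | hitTF
-- ===== SOURCE A (Python) =====
-- def hitTF(data, termUnik):
--     tf=[]
--     for i in range (len(termUnik)):
--         temp=[]
--         for j in range (len(data)):
--             jumlah=(data[j].count(termUnik[i]))
--             temp.append(jumlah)
--         tf.append(temp)
--     return (tf)
-- ===== SOURCE B (Python) =====
-- def hitTF(data, termUnik):
--     # Scatter algorithm: one pass over every word of every document, incrementing
--     # the matrix cell(s) for that word directly (no counting routine at all).
--     idx = {}
--     for r, t in enumerate(termUnik):
--         idx.setdefault(t, []).append(r)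
--     tf = [[0] * len(data) for _ in termUnik]
--     for j, doc in enumerate(data):
--         for w in doc:
--             for r in idx.get(w, []):
--                 tf[r][j] += 1
--     return tf
-- ===== Notes on version B (the rewrite author's own statement) =====
-- stated objective: faster
-- what changed: B inverts the computation: instead of counting each term in each document (gather), it makes a single pass over every word of every document and scatters +1 increments into a preallocated zero matrix via a term-to-row index, eliminating counting entirely.
import Mathlib
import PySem

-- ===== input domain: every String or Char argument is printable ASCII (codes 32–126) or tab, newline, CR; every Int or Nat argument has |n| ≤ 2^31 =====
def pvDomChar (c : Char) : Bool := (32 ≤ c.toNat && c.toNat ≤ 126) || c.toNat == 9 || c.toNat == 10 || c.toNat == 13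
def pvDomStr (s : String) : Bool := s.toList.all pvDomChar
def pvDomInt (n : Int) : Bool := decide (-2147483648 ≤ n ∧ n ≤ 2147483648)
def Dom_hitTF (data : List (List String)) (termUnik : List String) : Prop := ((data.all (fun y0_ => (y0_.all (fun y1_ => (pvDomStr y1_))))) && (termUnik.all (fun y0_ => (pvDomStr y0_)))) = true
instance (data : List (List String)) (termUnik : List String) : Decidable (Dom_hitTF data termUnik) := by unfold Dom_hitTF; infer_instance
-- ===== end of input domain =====

-- B replaces A's per-term counting scans (gather) by a single scatter pass: every word of
-- every document increments the matrix cells named by a term→row index (B is the faster algorithm).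

-- ===== PORT A =====
def hitTF (data : List (List String)) (termUnik : List String) : List (List Int) :=
  (PySem.List.pyRange 0 (termUnik.length : Int) 1).foldl (fun tf i =>
    tf ++ [(PySem.List.pyRange 0 (data.length : Int) 1).foldl (fun temp j =>
      temp ++ [((PySem.List.count (PySem.List.pyGetD data j []) (PySem.List.pyGetD termUnik i "")) : Int)]) []]) []

-- ===== PORT B =====
-- idx.setdefault(t, []).append(r) over enumerate(termUnik)
def pvIdx (termUnik : List String) : PySem.Dict String (List Int) :=
  (PySem.List.enumerate termUnik).foldl
    (fun d p => d.insert p.2 (d.getD p.2 [] ++ [p.1])) PySem.Dict.empty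

-- tf[r][j] += 1  (B's row/column indices are always nonnegative and in range)
def pvIncr (j : Nat) (tf : List (List Int)) (r : Int) : List (List Int) :=
  tf.modify r.toNat (fun row => row.modify j (· + 1))

def hitTF_alt (data : List (List String)) (termUnik : List String) : List (List Int) :=
  let idx := pvIdx termUnik
  let tf0 := termUnik.map (fun _ => List.replicate data.length (0 : Int))
  (PySem.List.enumerate data).foldl
    (fun tf p => p.2.foldl (fun tf w => (idx.getD w []).foldl (pvIncr p.1.toNat) tf) tf) tf0

-- ===== PRECONDITION & SPEC =====
def Spec_hitTF (data : List (List String)) (termUnik : List String) (out : List (List Int)) : Prop := out = hitTF_alt data termUnik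
instance (data : List (List String)) (termUnik : List String) (out : List (List Int)) : Decidable (Spec_hitTF data termUnik out) := by unfold Spec_hitTF; infer_instance

-- ===== CLAIM (what is proved, stated in full; the proofs are below) =====
def Claim_equal_hitTF : Prop := ∀ (data : List (List String)) (termUnik : List String), Dom_hitTF data termUnik → Spec_hitTF data termUnik (hitTF data termUnik)

-- ===== LEMMAS AND PROOFS =====

-- A's nested index loops compute the plain term×document count matrix.
theorem hitTF_eq_map (data : List (List String)) (termUnik : List String) :
    hitTF data termUnik
      = termUnik.map (fun t => data.map (fun doc => (doc.count t : Int))) := by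
  unfold hitTF
  rw [PySem.List.foldl_pyRange_zero_pyGetD' termUnik ""
        (fun tf t => tf ++ [(PySem.List.pyRange 0 (data.length : Int) 1).foldl (fun temp j =>
          temp ++ [((PySem.List.count (PySem.List.pyGetD data j []) t) : Int)]) []]) []]
  rw [PySem.List.foldl_append_singleton_eq_map]
  simp only [List.nil_append]
  refine List.map_congr_left (fun t _ => ?_)
  rw [PySem.List.foldl_pyRange_zero_pyGetD' data []
        (fun temp doc => temp ++ [((PySem.List.count doc t) : Int)]) []]
  rw [PySem.List.foldl_append_singleton_eq_map]
  simp [PySem.List.count_eq]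

-- proof-side abstractions for B: the row set of a term, a matrix entry, a matrix shape
def pvRows (termUnik : List String) (w : String) : List Int :=
  ((List.range termUnik.length).filter (fun r => termUnik[r]? = some w)).map (Nat.cast : Nat → Int)

def pvEnt (tf : List (List Int)) (r j : Nat) : Int := (tf.getD r []).getD j 0

def pvShape (tf : List (List Int)) (m n : Nat) : Prop :=
  tf.length = m ∧ ∀ row ∈ tf, row.length = n

theorem pvIdx_getD (termUnik : List String) (w : String) :
    (pvIdx termUnik).getD w [] = pvRows termUnik w := by
  induction termUnik using List.reverseRecOn generalizing w with
  | nil => simp [pvIdx, pvRows, PySem.List.enumerate, PySem.Dict.getD, PySem.Dict.get?, PySem.Dict.empty]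
  | append_singleton xs x ih =>
    have hfold : pvIdx (xs ++ [x])
        = (pvIdx xs).insert x ((pvIdx xs).getD x [] ++ [(xs.length : Int)]) := by
      simp [pvIdx, PySem.List.enumerate_append, List.foldl_append]
    have hrows : pvRows (xs ++ [x]) w
        = pvRows xs w ++ (if w = x then [(xs.length : Int)] else []) := by
      simp only [pvRows, List.length_append, List.length_cons, List.length_nil]
      rw [show xs.length + (0+1) = xs.length + 1 from rfl, List.range_succ, List.filter_append]
      rw [List.filter_congr (l := List.range xs.length)
        (q := fun r => xs[r]? = some w) ?_]
      · simp only [List.filter_cons, List.filter_nil, List.getElem?_concat_length]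
        by_cases h : w = x <;> simp [h] <;> exact fun hc => h hc.symm
      · intro r hr
        rw [List.mem_range] at hr
        simp [List.getElem?_append_left hr]
    rw [hfold, hrows, PySem.Dict.getD_insert]
    by_cases h : w = x <;> simp [h, ih]

theorem count_pvRows (termUnik : List String) (w : String) (r : Nat) (hr : r < termUnik.length) :
    (pvRows termUnik w).count ((r : Nat) : Int) = if termUnik[r]? = some w then 1 else 0 := by
  unfold pvRows
  rw [List.count_map_of_injective _ (Nat.cast : Nat → Int) (fun a b hab => by omega) r]
  by_cases h : termUnik[r]? = some w
  · rw [List.count_filter (by simpa using h)]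
    simp [h, List.count_eq_one_of_mem List.nodup_range (List.mem_range.mpr hr)]
  · rw [List.count_eq_zero.mpr (by simp [h])]
    simp [h]

theorem shape_incr {tf : List (List Int)} {m n : Nat} (h : pvShape tf m n) (j : Nat) (r : Int) :
    pvShape (pvIncr j tf r) m n := by
  refine ⟨by simpa [pvIncr] using h.1, ?_⟩
  intro row hrow
  rw [List.mem_iff_getElem?] at hrow
  obtain ⟨k, hk⟩ := hrow
  rw [pvIncr, List.getElem?_modify] at hk
  cases htk : tf[k]? with
  | none => rw [htk] at hk; cases hk
  | some row0 =>
    have hmem := List.mem_of_getElem? htk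
    rw [htk] at hk
    cases hk
    split
    · rw [List.length_modify]; exact h.2 _ hmem
    · exact h.2 _ hmem

theorem ent_incr {tf : List (List Int)} {m n : Nat} (h : pvShape tf m n)
    {r' j' : Nat} (hr' : r' < m) (hj' : j' < n) (j : Nat) (r : Int) :
    pvEnt (pvIncr j tf r) r' j' = pvEnt tf r' j' + (if r.toNat = r' ∧ j = j' then 1 else 0) := by
  have hlt : r' < tf.length := h.1 ▸ hr'
  obtain ⟨row, hrow⟩ : ∃ row, tf[r']? = some row := ⟨tf[r'], List.getElem?_eq_getElem hlt⟩
  have hrowlen : row.length = n := h.2 _ (List.mem_of_getElem? hrow)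
  unfold pvEnt pvIncr
  rw [List.getD_eq_getElem?_getD, List.getD_eq_getElem?_getD, List.getElem?_modify, hrow,
    List.getD_eq_getElem?_getD, List.getD_eq_getElem?_getD, hrow]
  by_cases he : r.toNat = r'
  · simp only [he, Option.getD_some]
    obtain ⟨v, hv⟩ : ∃ v, row[j']? = some v := ⟨row[j']'(hrowlen ▸ hj'), List.getElem?_eq_getElem (hrowlen ▸ hj')⟩
    rw [hv]
    by_cases hje : j = j' <;> simp [hje, hv]
  · simp [he]

theorem shape_fold {L : List Int} {tf : List (List Int)} {m n : Nat} (h : pvShape tf m n) (j : Nat) :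
    pvShape (L.foldl (pvIncr j) tf) m n := by
  induction L generalizing tf with
  | nil => exact h
  | cons x L ih => exact ih (shape_incr h j x)

theorem mem_pvRows_nonneg (termUnik : List String) (w : String) :
    ∀ x ∈ pvRows termUnik w, 0 ≤ x := by
  intro x hx
  simp only [pvRows, List.mem_map] at hx
  obtain ⟨k, _, rfl⟩ := hx
  exact Int.natCast_nonneg k

theorem ent_fold {L : List Int} (hL : ∀ x ∈ L, 0 ≤ x) {tf : List (List Int)} {m n : Nat}
    (h : pvShape tf m n) {r' j' : Nat} (hr' : r' < m) (hj' : j' < n) (j : Nat) :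
    pvEnt (L.foldl (pvIncr j) tf) r' j'
      = pvEnt tf r' j' + (if j = j' then (L.count ((r' : Nat) : Int) : Int) else 0) := by
  induction L generalizing tf with
  | nil => simp
  | cons x L ih =>
    have hx : (0 : Int) ≤ x := hL x (List.mem_cons_self ..)
    rw [List.foldl_cons, ih (fun y hy => hL y (List.mem_cons_of_mem _ hy)) (shape_incr h j x),
        ent_incr h hr' hj' j x, List.count_cons]
    have hxr : ((x == ((r' : Nat) : Int)) = true) ↔ (x.toNat = r') := by
      constructor
      · intro he; rw [beq_iff_eq] at he; omega
      · intro he; rw [beq_iff_eq]; omega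
    by_cases hj : j = j' <;> by_cases hxe : x.toNat = r' <;>
      simp [hj, hxe, hxr] <;> push_cast <;> ring

theorem shape_doc (termUnik : List String) {tf : List (List Int)} {m n : Nat}
    (h : pvShape tf m n) (j : Nat) (doc : List String) :
    pvShape (doc.foldl (fun tf w => (pvRows termUnik w).foldl (pvIncr j) tf) tf) m n := by
  induction doc generalizing tf with
  | nil => exact h
  | cons w doc ih => exact ih (shape_fold h j)

theorem ent_doc (termUnik : List String) {tf : List (List Int)} {n : Nat}
    (h : pvShape tf termUnik.length n) {r' j' : Nat}
    (hr' : r' < termUnik.length) (hj' : j' < n) (j : Nat) (doc : List String) :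
    pvEnt (doc.foldl (fun tf w => (pvRows termUnik w).foldl (pvIncr j) tf) tf) r' j'
      = pvEnt tf r' j'
        + (if j = j' then ((doc.count (termUnik[r']'hr')) : Int) else 0) := by
  induction doc generalizing tf with
  | nil => simp
  | cons w doc ih =>
    rw [List.foldl_cons, ih (shape_fold h j),
        ent_fold (mem_pvRows_nonneg termUnik w) h hr' hj' j, count_pvRows termUnik w r' hr',
        List.count_cons]
    have hg : termUnik[r']? = some (termUnik[r']'hr') := List.getElem?_eq_getElem hr'
    by_cases hwe : termUnik[r']'hr' = w
    · simp [hg, hwe]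
      by_cases hj : j = j' <;> simp [hj] <;> push_cast <;> try ring
    · have hne : ¬ (termUnik[r']? = some w) := by rw [hg]; simp [hwe]
      have hbe : (w == termUnik[r']'hr') = false := by
        rw [beq_eq_false_iff_ne]; exact fun hc => hwe hc.symm
      simp [hne, hbe]

theorem ent_data (termUnik : List String) (ds : List (List String)) (s : Nat)
    {tf : List (List Int)} {n : Nat} (h : pvShape tf termUnik.length n) {r' j' : Nat}
    (hr' : r' < termUnik.length) (hj' : j' < n) :
    pvEnt ((PySem.List.enumerate ds (s : Int)).foldl
        (fun tf p => p.2.foldl (fun tf w => (pvRows termUnik w).foldl (pvIncr p.1.toNat) tf) tf) tf) r' j'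
      = pvEnt tf r' j'
        + (if s ≤ j' ∧ j' < s + ds.length
            then (((ds[j' - s]?.getD []).count (termUnik[r']'hr')) : Int) else 0) := by
  induction ds generalizing s tf with
  | nil => simp [PySem.List.enumerate]
  | cons d ds ih =>
    rw [PySem.List.enumerate_cons, List.foldl_cons,
        show ((s : Int) + 1) = (((s+1 : Nat)) : Int) by push_cast; ring,
        ih (s+1) (shape_doc termUnik h _ d),
        ent_doc termUnik h hr' hj' ((s : Int)).toNat d,
        Int.toNat_natCast]
    by_cases hje : s = j'
    · subst hje
      have h1 : ¬ (s + 1 ≤ s) := by omega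
      have h2 : s ≤ s ∧ s < s + (ds.length + 1) := by omega
      simp [h1, h2]
    · by_cases hin : s + 1 ≤ j' ∧ j' < s + 1 + ds.length
      · have h2 : s ≤ j' ∧ j' < s + (ds.length + 1) := by omega
        have hsub : j' - s = (j' - (s+1)) + 1 := by omega
        simp [hje, hin, h2, hsub]
      · have h2 : ¬ (s ≤ j' ∧ j' < s + (ds.length + 1)) := by omega
        simp [hje, hin, h2]
        exact fun hlt hup => absurd ⟨by omega, by omega⟩ hin

theorem shape_tf0 (data : List (List String)) (termUnik : List String) :
    pvShape (termUnik.map (fun _ => List.replicate data.length (0 : Int))) termUnik.length data.length := by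
  constructor
  · simp
  · intro row hrow
    simp only [List.mem_map] at hrow
    obtain ⟨_, _, rfl⟩ := hrow
    simp

theorem ent_tf0 (data : List (List String)) (termUnik : List String) (r j : Nat) :
    pvEnt (termUnik.map (fun _ => List.replicate data.length (0 : Int))) r j = 0 := by
  unfold pvEnt
  rw [List.getD_eq_getElem?_getD, List.getD_eq_getElem?_getD, List.getElem?_map]
  cases termUnik[r]? <;> simp [List.getD_eq_getElem?_getD, List.getElem?_replicate] <;>
    split <;> rfl

theorem shape_data (termUnik : List String) (ds : List (Int × List String))
    {tf : List (List Int)} {m n : Nat} (h : pvShape tf m n) :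
    pvShape (ds.foldl
        (fun tf p => p.2.foldl (fun tf w => (pvRows termUnik w).foldl (pvIncr p.1.toNat) tf) tf) tf) m n := by
  induction ds generalizing tf with
  | nil => exact h
  | cons p ds ih => exact ih (shape_doc termUnik h p.1.toNat p.2)

theorem hitTF_alt_eq_map (data : List (List String)) (termUnik : List String) :
    hitTF_alt data termUnik
      = termUnik.map (fun t => data.map (fun doc => (doc.count t : Int))) := by
  unfold hitTF_alt
  simp only [pvIdx_getD]
  have hsh0 := shape_tf0 data termUnik
  have hsh := shape_data termUnik (PySem.List.enumerate data) hsh0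
  apply List.ext_getElem
  · rw [hsh.1]; simp
  · intro r h1 h2
    apply List.ext_getElem
    · rw [hsh.2 _ (List.getElem_mem _), List.getElem_map]
      simp
    · intro j hj1 hj2
      have hr : r < termUnik.length := by simpa using h2
      have hj : j < data.length := by
        have := hsh.2 _ (List.getElem_mem h1)
        omega
      have he : pvEnt ((PySem.List.enumerate data).foldl
          (fun tf p => p.2.foldl (fun tf w => (pvRows termUnik w).foldl (pvIncr p.1.toNat) tf) tf)
          (termUnik.map (fun _ => List.replicate data.length (0 : Int)))) r j
          = ((data[j]'hj).count (termUnik[r]'hr) : Int) := by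
        rw [show (PySem.List.enumerate data) = (PySem.List.enumerate data ((0:Nat):Int)) by norm_num]
        rw [ent_data termUnik data 0 hsh0 hr hj, ent_tf0]
        have hcond : 0 ≤ j ∧ j < 0 + data.length := by omega
        rw [if_pos hcond]
        simp [List.getElem?_eq_getElem hj]
      simp only [List.getElem_map]
      rw [← he]
      unfold pvEnt
      rw [List.getD_eq_getElem?_getD, List.getD_eq_getElem?_getD,
          List.getElem?_eq_getElem h1, Option.getD_some,
          List.getElem?_eq_getElem hj1, Option.getD_some]

-- ===== VERDICT (by name: the statement is the Claim_ definition above) =====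
theorem hitTF_spec : Claim_equal_hitTF := by
  intro data termUnik _
  unfold Spec_hitTF
  rw [hitTF_eq_map, hitTF_alt_eq_map]
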